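-- pv_equiv track=rewrite | github.com/yash-goyal-0910/T-P_Assignments | Adv_Batch/Array_Problem.py | rearrage_alt
-- ===== SOURCE A (Python) =====
-- def rearrage_alt(arr):
--     arr = sorted(arr)
--     alt = True
--     n = len(arr)
--     i = 0
--     while i < n:
--         if alt:
--             alt = False
--             arr.insert(i,arr.pop())
--             i += 1
--         else:
--             alt = True
--             i += 1
--     return arr
-- ===== SOURCE B (Python) =====
-- def _weave(s):
--     # s is sorted ascending; even slots get the largest remaining (descending),
--     # odd slots get the smallest remaining (ascending)
--     k = len(s) // 2
--     lows = s[:k]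
--     highs = s[k:][::-1]
--     out = []
--     for h, l in zip(highs, lows):
--         out += [h, l]
--     if k < len(highs):
--         out.append(highs[-1])
--     return out
--
-- def rearrage_alt(arr):
--     return _weave(sorted(arr))
-- ===== Notes on version B (the rewrite author's own statement) =====
-- stated objective: faster
-- what changed: Replaced the while-loop of repeated pop()+insert(i, ...) (each an O(n) list shift, O(n^2) total after the sort) with a single slice-and-zip weave of the sorted list: the top half reversed interleaved with the bottom half.
import Mathlib
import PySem

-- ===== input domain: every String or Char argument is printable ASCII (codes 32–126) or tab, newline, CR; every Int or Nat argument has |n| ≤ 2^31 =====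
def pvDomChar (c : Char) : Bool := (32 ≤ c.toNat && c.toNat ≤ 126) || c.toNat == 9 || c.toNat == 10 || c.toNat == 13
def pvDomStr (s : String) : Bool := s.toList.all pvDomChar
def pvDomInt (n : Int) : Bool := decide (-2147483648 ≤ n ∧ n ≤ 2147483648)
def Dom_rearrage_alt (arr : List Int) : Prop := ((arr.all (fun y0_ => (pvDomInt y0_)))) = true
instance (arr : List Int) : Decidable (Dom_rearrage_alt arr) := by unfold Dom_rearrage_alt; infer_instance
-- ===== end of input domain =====

-- B replaces A's while-loop of repeated pop()+insert(i, ...) with a single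
-- slice-and-zip weave of the sorted list (top half reversed interleaved with
-- the bottom half); objective: faster.

-- ===== PORT A =====
-- the while-loop: state (arr, alt, i); n = len(arr) is fixed before the loop
def pvLoopA (n : Nat) (arr : List Int) (alt : Bool) (i : Nat) : List Int :=
  if i < n then
    if alt then
      match PySem.List.pop? arr with
      | some (z, arr') => pvLoopA n (PySem.List.insert arr' (i : Int) z) false (i + 1)
      | none => arr   -- Python would raise IndexError here; never reached (arr keeps length n > i)
    else pvLoopA n arr true (i + 1)
  else arr
termination_by n - i
decreasing_by all_goals omega

def rearrage_alt (arr : List Int) : List Int :=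
  let s := PySem.List.sorted arr (fun x => x)
  pvLoopA s.length s true 0

-- ===== PORT B =====
-- helper _weave(s) of Source B
def pvWeave (s : List Int) : List Int :=
  let k := s.length / 2
  let lows := PySem.List.slice s none (some (k : Int))                 -- s[:k]
  let highs := (PySem.List.slice s (some (k : Int)) none).reverse      -- s[k:][::-1]
  let out := (highs.zip lows).foldl (fun acc p => acc ++ [p.1, p.2]) []
  if k < highs.length then
    match PySem.List.pyGet? highs (-1) with   -- highs[-1]; the guard makes highs nonempty
    | some x => out ++ [x]
    | none => out
  else out

def rearrage_alt_alt (arr : List Int) : List Int :=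
  pvWeave (PySem.List.sorted arr (fun x => x))

-- ===== PRECONDITION & SPEC =====
def Spec_rearrage_alt (arr : List Int) (out : List Int) : Prop := out = rearrage_alt_alt arr
instance (arr : List Int) (out : List Int) : Decidable (Spec_rearrage_alt arr out) := by unfold Spec_rearrage_alt; infer_instance

-- ===== CLAIM (what is proved, stated in full; the proofs are below) =====
def Claim_equal_rearrage_alt : Prop := ∀ (arr : List Int), Dom_rearrage_alt arr → Spec_rearrage_alt arr (rearrage_alt arr)

-- ===== LEMMAS AND PROOFS =====

-- common characterisation of both programs' result on an arbitrary list t: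
-- pvG t = last t :: head (dropLast t) :: pvG (middle of t)
def pvG : List Int → List Int
  | [] => []
  | a :: rest =>
    match h : (a :: rest).dropLast with
    | [] => [(a :: rest).getLast (by simp)]
    | _y :: m => (a :: rest).getLast (by simp) :: _y :: pvG m
termination_by t => t.length
decreasing_by
  have h2 : (a :: rest).dropLast.length = m.length + 1 := by rw [h]; rfl
  simp only [List.length_dropLast, List.length_cons] at h2
  simp only [List.length_cons]
  omega

theorem pvG_nil : pvG [] = [] := by rw [pvG.eq_def]

theorem pvG_singleton (x : Int) : pvG [x] = [x] := by
  rw [pvG.eq_def]; rfl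

theorem pvG_concat (y : Int) (m : List Int) (z : Int) :
    pvG (y :: m ++ [z]) = z :: y :: pvG m := by
  have hd : (y :: (m ++ [z])).dropLast = y :: m := by
    rw [show (y :: (m ++ [z])) = (y :: m) ++ [z] by simp, List.dropLast_concat]
  rw [pvG.eq_def]
  split
  · next h => exact absurd h (by simp)
  · next y' m' h =>
    injection h with h1 h2
    subst h1; subst h2
    split
    · next h =>
      simp only [List.append_eq] at h
      rw [hd] at h
      exact absurd h (by simp)
    · next y2 m2 h =>
      simp only [List.append_eq] at h ⊢
      rw [hd] at h
      injection h with h1 h2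
      subst h1; subst h2
      congr 1
      simp

def pvItl : List (Int × Int) → List Int
  | [] => []
  | p :: ps => p.1 :: p.2 :: pvItl ps

theorem foldl_pvItl (ps : List (Int × Int)) (acc : List Int) :
    ps.foldl (fun acc p => acc ++ [p.1, p.2]) acc = acc ++ pvItl ps := by
  induction ps generalizing acc with
  | nil => simp [pvItl]
  | cons p ps ih => simp [List.foldl, pvItl, ih]

-- closed form of pvWeave (PySem slices/index resolved to take/drop/reverse/getLast?)
theorem pvWeave_closed (s : List Int) :
    pvWeave s =
      (if s.length / 2 < ((s.drop (s.length / 2)).reverse).length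
       then pvItl (((s.drop (s.length / 2)).reverse).zip (s.take (s.length / 2)))
              ++ ((s.drop (s.length / 2)).reverse).getLast?.toList
       else pvItl (((s.drop (s.length / 2)).reverse).zip (s.take (s.length / 2)))) := by
  simp only [pvWeave, PySem.List.slice_to_natCast, PySem.List.slice_from_natCast,
    foldl_pvItl, List.nil_append, PySem.List.pyGet?_neg_one]
  split_ifs with hc
  · cases ((s.drop (s.length / 2)).reverse).getLast? <;> simp [Option.toList]
  · rfl

theorem pvWeave_step (y : Int) (m : List Int) (z : Int) :
    pvWeave (y :: m ++ [z]) = z :: y :: pvWeave m := by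
  rw [pvWeave_closed, pvWeave_closed]
  have hj : m.length / 2 ≤ m.length := Nat.div_le_self _ _
  have h1 : (y :: m ++ [z]).length / 2 = m.length / 2 + 1 := by
    simp
    omega
  have htake : (y :: m ++ [z]).take (m.length / 2 + 1) = y :: m.take (m.length / 2) := by
    simp only [List.cons_append, List.take_succ_cons]
    rw [List.take_append_of_le_length hj]
  have hdrop : (y :: m ++ [z]).drop (m.length / 2 + 1) = m.drop (m.length / 2) ++ [z] := by
    simp only [List.cons_append, List.drop_succ_cons]
    rw [List.drop_append_of_le_length hj]
  rw [h1, htake, hdrop, List.reverse_append]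
  cases hd : m.drop (m.length / 2) with
  | nil =>
    have hm : m.length = 0 := by
      have hl := congrArg List.length hd
      simp at hl
      omega
    cases m with
    | nil => simp [pvItl]
    | cons a b => simp at hm
  | cons d ds =>
    have hds : (d :: ds).reverse = ds.reverse ++ [d] := by simp
    by_cases hc : m.length / 2 < ds.length + 1
    · rw [if_pos (by simp [hds]; omega), if_pos (by simp [hds]; omega)]
      have hlast1 : ([z].reverse ++ (d :: ds).reverse).getLast? = some d := by
        rw [hds, List.reverse_singleton]
        rw [show ([z] ++ (ds.reverse ++ [d])) = ([z] ++ ds.reverse) ++ [d] by simp]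
        exact List.getLast?_concat
      have hlast2 : ((d :: ds).reverse).getLast? = some d := by
        rw [hds]
        exact List.getLast?_concat
      rw [hlast1, hlast2]
      simp [pvItl]
    · rw [if_neg (by simp [hds]; omega), if_neg (by simp [hds]; omega)]
      simp [pvItl]

theorem pvWeave_eq_pvG_aux : ∀ (N : Nat) (t : List Int), t.length = N → pvWeave t = pvG t := by
  intro N
  induction N using Nat.strong_induction_on with
  | _ N ih =>
    intro t ht
    match t with
    | [] => rw [pvG_nil]; rfl
    | y :: rest =>
      rcases List.eq_nil_or_concat rest with hr | ⟨m, z, hr⟩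
      · subst hr
        rw [pvG_singleton]
        simp [pvWeave_closed, pvItl]
      · subst hr
        simp only [List.concat_eq_append] at ht ⊢
        rw [← List.cons_append, pvWeave_step, pvG_concat]
        have hmlen : m.length < N := by
          subst ht; simp
        rw [ih m.length hmlen m rfl]

theorem pvWeave_eq_pvG (t : List Int) : pvWeave t = pvG t :=
  pvWeave_eq_pvG_aux t.length t rfl

theorem pvLoopA_inv (n : Nat) : ∀ (d i : Nat) (arr : List Int), n - i = d →
    arr.length = n → i ≤ n →
    pvLoopA n arr true i = arr.take i ++ pvG (arr.drop i) := by
  intro d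
  induction d using Nat.strong_induction_on with
  | _ d ih =>
    intro i arr hd hlen hin
    by_cases hi : i < n
    · have hne : arr ≠ [] := by
        intro h; subst h; simp at hlen; omega
      obtain ⟨dl, z, hdz⟩ : ∃ dl z, arr = dl ++ [z] := by
        rcases List.eq_nil_or_concat arr with h | ⟨dl, z, h⟩
        · exact absurd h hne
        · exact ⟨dl, z, by rw [h, List.concat_eq_append]⟩
      subst hdz
      have hdl : dl.length = n - 1 := by simp at hlen; omega
      rw [pvLoopA.eq_def]
      rw [if_pos hi]
      simp only [PySem.List.pop?_last]
      have hins : PySem.List.insert dl (i : Int) z = dl.take i ++ z :: dl.drop i :=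
        PySem.List.insert_natCast dl i z (by omega)
      rw [hins]
      have hfalse : pvLoopA n (dl.take i ++ z :: dl.drop i) false (i + 1)
          = if i + 1 < n then pvLoopA n (dl.take i ++ z :: dl.drop i) true (i + 1 + 1)
            else (dl.take i ++ z :: dl.drop i) := by
        rw [pvLoopA.eq_def]
        by_cases h : i + 1 < n <;> simp [h]
      rw [hfalse]
      by_cases h2 : i + 1 < n
      · rw [if_pos h2]
        obtain ⟨y, mm, hy⟩ : ∃ y mm, dl.drop i = y :: mm := by
          cases hcase : dl.drop i with
          | nil =>
            exfalso
            have := congrArg List.length hcase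
            simp at this
            omega
          | cons a b => exact ⟨a, b, rfl⟩
        have hti : (dl.take i).length = i := by simp; omega
        have harr2len : (dl.take i ++ z :: dl.drop i).length = n := by simp; omega
        rw [show i + 1 + 1 = i + 2 from rfl]
        rw [ih (n - (i + 2)) (by omega) (i + 2) _ rfl harr2len (by omega)]
        rw [hy]
        have hsplit : dl.take i ++ z :: y :: mm = (dl.take i ++ [z, y]) ++ mm := by simp
        have hlen2 : (dl.take i ++ [z, y]).length = i + 2 := by simp [hti]
        have ht2 : (dl.take i ++ z :: y :: mm).take (i + 2) = dl.take i ++ [z, y] := by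
          rw [hsplit, ← hlen2, List.take_left]
        have hd2 : (dl.take i ++ z :: y :: mm).drop (i + 2) = mm := by
          rw [hsplit, ← hlen2, List.drop_left]
        rw [ht2, hd2]
        have hT : (dl ++ [z]).take i = dl.take i := List.take_append_of_le_length (by omega)
        have hD : (dl ++ [z]).drop i = y :: mm ++ [z] := by
          rw [List.drop_append_of_le_length (by omega), hy]
        rw [hT, hD, pvG_concat]
        simp
      · rw [if_neg h2]
        have hdldrop : dl.drop i = [] := by
          apply List.drop_eq_nil_of_le
          omega
        have htakedl : dl.take i = dl := List.take_of_length_le (by omega)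
        have hD : (dl ++ [z]).drop i = [z] := by
          rw [List.drop_append_of_le_length (by omega), hdldrop]
          simp
        have hT : (dl ++ [z]).take i = dl := by
          rw [List.take_append_of_le_length (by omega), htakedl]
        rw [hdldrop, htakedl, hD, hT, pvG_singleton]
        simp
    · have hieq : i = n := by omega
      rw [pvLoopA.eq_def]
      rw [if_neg hi]
      have h1 : arr.take i = arr := List.take_of_length_le (by omega)
      have h2 : arr.drop i = [] := List.drop_eq_nil_of_le (by omega)
      rw [h1, h2, pvG_nil]
      simp

-- ===== VERDICT (by name: the statement is the Claim_ definition above) =====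
theorem rearrage_alt_spec : Claim_equal_rearrage_alt := by
  intro arr _
  unfold Spec_rearrage_alt rearrage_alt rearrage_alt_alt
  set s := PySem.List.sorted arr (fun x => x) with hs
  rw [pvLoopA_inv s.length s.length 0 s rfl rfl (by omega)]
  simp [pvWeave_eq_pvG]
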